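-- pv_equiv track=rewrite | github.com/ApoStoLll/srom1 | lab4.py | mulBig
-- ===== SOURCE A (Python) =====
-- def createMatrix(num1): #!!!!!!!!!!!!!!!!!!!!!!!!!!!
--     m = len(num1)
--     p = 2 * m + 1
--     matrix = []
--     for i in range(m):
--         matrix.append([])
--         for j in range(m):
--             if ((2 ** i) + (2 ** j)) % p == 1 or ((2 ** i) - (2 ** j)) % p == 1 or (-(2 ** i) + (2 ** j)) % p == 1 or (-(2 ** i) - (2 ** j)) % p == 1:
--                 matrix[i].append(1)
--             else:
--                 matrix[i].append(0)
--     return matrix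
--
-- def mulBig(num1, num2): #Bin
--     matrix = createMatrix(num1)
--     d = []
--     for k in range(len(num1)):
--         c = []
--         for i in range(len(num1)):
--             summ = 0
--             for j in range(len(num1)):
--                 summ += num1[j] * matrix[j][i]
--             c.append(summ % 2)
--         summ = 0
--         for i in range(len(c)):
--             summ += c[i] * num2[i]
--         d.append(summ % 2)
--         x = num1[0]
--         del num1[0]
--         num1.append(x)
--         y = num2[0]
--         del num2[0]
--         num2.append(y)
--     return d
-- ===== SOURCE B (Python) =====
-- # Same return value as A; B does not mutate its arguments (A rotates both lists in place).
-- def mulBig(num1, num2):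
--     m = len(num1)
--     if m == 0:
--         return []
--     p = 2 * m + 1
--     # powers of two mod p, computed incrementally (no bignum exponentiation)
--     pow2 = []
--     v = 1
--     for _ in range(m):
--         pow2.append(v)
--         v = v * 2 % p
--     # sparse list of the (j, i) positions where the multiplication matrix is 1
--     pairs = [(j, i) for j in range(m) for i in range(m)
--              if (pow2[j] + pow2[i]) % p == 1 or (pow2[j] - pow2[i]) % p == 1
--              or (-pow2[j] + pow2[i]) % p == 1 or (-pow2[j] - pow2[i]) % p == 1]
--     n2 = len(num2)
--     return [sum(num1[(j + k) % m] * num2[(i + k) % n2] for j, i in pairs) % 2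
--             for k in range(m)]
-- ===== Notes on version B (the rewrite author's own statement) =====
-- stated objective: faster
-- what changed: B precomputes 2^i mod p incrementally (no bignum exponentiation), extracts once the sparse list of nonzero matrix positions, and reads rotated entries by index arithmetic (j+k) mod len instead of re-running A's triple loop over a physically rotated pair of lists; B also does not mutate its arguments (A rotates num1 and num2 in place).
import Mathlib
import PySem

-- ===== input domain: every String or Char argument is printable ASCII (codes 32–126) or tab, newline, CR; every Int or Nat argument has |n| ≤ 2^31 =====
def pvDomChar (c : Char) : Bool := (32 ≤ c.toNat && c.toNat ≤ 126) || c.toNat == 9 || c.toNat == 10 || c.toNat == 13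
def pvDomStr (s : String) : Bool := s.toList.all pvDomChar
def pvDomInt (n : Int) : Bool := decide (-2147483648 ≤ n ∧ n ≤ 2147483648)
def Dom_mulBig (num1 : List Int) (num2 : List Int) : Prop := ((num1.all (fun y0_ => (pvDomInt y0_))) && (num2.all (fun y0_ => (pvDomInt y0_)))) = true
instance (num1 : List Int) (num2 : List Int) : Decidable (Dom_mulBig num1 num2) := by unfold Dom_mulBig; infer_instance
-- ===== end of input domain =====

-- B replaces A's O(m^3) loop nest (with bignum 2**i reductions) by a sparse list of the
-- matrix's nonzero positions and index arithmetic instead of physical rotation (equal return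
-- value; A also rotates both argument lists in place, B leaves its arguments untouched).

-- ===== PORT A =====
def createMatrixA (num1 : List Int) : List (List Int) :=
  let m := num1.length
  let p : Int := 2 * (m : Int) + 1
  (List.range m).foldl (fun (matrix : List (List Int)) (i : Nat) =>
    matrix ++ [(List.range m).foldl (fun (row : List Int) (j : Nat) =>
      row ++ [if (PySem.Int.mod ((2:Int) ^ i + (2:Int) ^ j) p == 1 ||
                  PySem.Int.mod ((2:Int) ^ i - (2:Int) ^ j) p == 1 ||
                  PySem.Int.mod (-(2:Int) ^ i + (2:Int) ^ j) p == 1 ||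
                  PySem.Int.mod (-(2:Int) ^ i - (2:Int) ^ j) p == 1) then (1:Int) else 0]) []]) []

def mulBigStepA (matrix : List (List Int)) (st : List Int × List Int × List Int) :
    List Int × List Int × List Int :=
  let num1 := st.1
  let num2 := st.2.1
  let c := (List.range num1.length).foldl (fun (c : List Int) (i : Nat) =>
    c ++ [PySem.Int.mod ((List.range num1.length).foldl (fun (summ : Int) (j : Nat) =>
        summ + PySem.List.pyGetD num1 (j : Int) 0 *
          PySem.List.pyGetD (PySem.List.pyGetD matrix (j : Int) []) (i : Int) 0) 0) 2]) []
  let summ := (List.range c.length).foldl (fun (summ : Int) (i : Nat) =>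
    summ + PySem.List.pyGetD c (i : Int) 0 * PySem.List.pyGetD num2 (i : Int) 0) 0
  (num1.drop 1 ++ [PySem.List.pyGetD num1 0 0],
   num2.drop 1 ++ [PySem.List.pyGetD num2 0 0],
   st.2.2 ++ [PySem.Int.mod summ 2])

def mulBig (num1 : List Int) (num2 : List Int) : List Int :=
  let matrix := createMatrixA num1
  ((List.range num1.length).foldl (fun st _k => mulBigStepA matrix st) (num1, num2, [])).2.2

-- ===== PORT B =====
def pow2ListB (p : Int) : Nat → Int → List Int
  | 0, _ => []
  | Nat.succ n, v => v :: pow2ListB p n (PySem.Int.mod (v * 2) p)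

def mulBig_alt (num1 : List Int) (num2 : List Int) : List Int :=
  let m := num1.length
  if m = 0 then []
  else
    let p : Int := 2 * (m : Int) + 1
    let pow2 := pow2ListB p m 1
    let pairs : List (Nat × Nat) := (List.range m).flatMap (fun (j : Nat) =>
      ((List.range m).filter (fun (i : Nat) =>
        PySem.Int.mod (PySem.List.pyGetD pow2 (j : Int) 0 + PySem.List.pyGetD pow2 (i : Int) 0) p == 1 ||
        PySem.Int.mod (PySem.List.pyGetD pow2 (j : Int) 0 - PySem.List.pyGetD pow2 (i : Int) 0) p == 1 ||
        PySem.Int.mod (-PySem.List.pyGetD pow2 (j : Int) 0 + PySem.List.pyGetD pow2 (i : Int) 0) p == 1 ||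
        PySem.Int.mod (-PySem.List.pyGetD pow2 (j : Int) 0 - PySem.List.pyGetD pow2 (i : Int) 0) p == 1)).map
        (fun (i : Nat) => (j, i)))
    let n2 := num2.length
    (List.range m).map (fun k =>
      PySem.Int.mod ((pairs.map (fun (ji : Nat × Nat) =>
        PySem.List.pyGetD num1 (((ji.1 + k) % m : Nat) : Int) 0 *
        PySem.List.pyGetD num2 (((ji.2 + k) % n2 : Nat) : Int) 0)).sum) 2)

-- ===== PRECONDITION & SPEC =====
-- Pre_ excludes only inputs on which A raises: for a nonempty num1, A indexes num2[i] for
-- every i < len(num1) (IndexError when num2 is shorter).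
def Pre_mulBig (num1 : List Int) (num2 : List Int) : Prop :=
  num1 = [] ∨ num1.length ≤ num2.length
instance (num1 : List Int) (num2 : List Int) : Decidable (Pre_mulBig num1 num2) := by
  unfold Pre_mulBig; infer_instance

def pvWitness_mulBig : List Int × List Int := ([1, 0, 1, 0, 1], [1, 1, 0, 0, 1])

def Spec_mulBig (num1 : List Int) (num2 : List Int) (out : List Int) : Prop := out = mulBig_alt num1 num2
instance (num1 : List Int) (num2 : List Int) (out : List Int) : Decidable (Spec_mulBig num1 num2 out) := by unfold Spec_mulBig; infer_instance

-- ===== CLAIM (what is proved, stated in full; the proofs are below) =====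
def Claim_equal_mulBig : Prop := ∀ (num1 : List Int) (num2 : List Int), Dom_mulBig num1 num2 → Pre_mulBig num1 num2 → Spec_mulBig num1 num2 (mulBig num1 num2)

-- ===== LEMMAS AND PROOFS =====

-- the four-way residue test both programs perform, on arbitrary operands
def cnd (p x y : Int) : Bool :=
  (PySem.Int.mod (x + y) p == 1) || (PySem.Int.mod (x - y) p == 1) ||
  (PySem.Int.mod (-x + y) p == 1) || (PySem.Int.mod (-x - y) p == 1)

-- the common value both programs compute at position k (double sum over the 0/1 matrix)
def dVal (num1 num2 : List Int) (k : Nat) : Int :=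
  let m := num1.length
  let p : Int := 2 * (m : Int) + 1
  PySem.Int.mod (((List.range m).map (fun j => ((List.range m).map (fun i =>
    if cnd p ((2:Int) ^ j) ((2:Int) ^ i) then
      num1.getD ((j + k) % m) 0 * num2.getD ((i + k) % num2.length) 0
    else 0)).sum)).sum) 2

-- one in-place rotation step, as A performs it on both lists
def rotA (xs : List Int) : List Int := xs.drop 1 ++ [PySem.List.pyGetD xs 0 0]

theorem rotA_length (xs : List Int) (h : 0 < xs.length) : (rotA xs).length = xs.length := by
  simp [rotA]; omega

theorem rotA_getD (xs : List Int) (j : Nat) (hj : j < xs.length) :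
    (rotA xs).getD j 0 = xs.getD ((j + 1) % xs.length) 0 := by
  match xs with
  | [] => simp at hj
  | x :: t =>
    have hx : PySem.List.pyGetD (x :: t) 0 0 = x := by simp [PySem.List.pyGetD]
    simp only [rotA, List.drop_one, List.tail_cons, hx, List.length_cons]
    rcases Nat.lt_or_ge j t.length with h | h
    · rw [List.getD_append _ _ _ _ h, Nat.mod_eq_of_lt (by omega), List.getD_cons_succ]
    · have hj' : j = t.length := by simp at hj; omega
      subst hj'
      simp [List.getD]

theorem rotA_iter_length (xs : List Int) (h : 0 < xs.length) (n : Nat) :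
    (rotA^[n] xs).length = xs.length := by
  induction n with
  | zero => rfl
  | succ n ih =>
    rw [Function.iterate_succ_apply', rotA_length _ (by omega)]; exact ih

theorem rotA_iter_getD (xs : List Int) (h : 0 < xs.length) (n j : Nat) (hj : j < xs.length) :
    (rotA^[n] xs).getD j 0 = xs.getD ((j + n) % xs.length) 0 := by
  induction n generalizing j with
  | zero => simp [Nat.mod_eq_of_lt hj]
  | succ n ih =>
    rw [Function.iterate_succ_apply', rotA_getD _ j (by rw [rotA_iter_length _ h]; exact hj),
        rotA_iter_length _ h, ih _ (Nat.mod_lt _ h), Nat.mod_add_mod]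
    ring_nf

theorem foldl_ignore_iterate {α β : Type} (F : α → α) (l : List β) (init : α) :
    l.foldl (fun st _ => F st) init = F^[l.length] init := by
  induction l generalizing init with
  | nil => rfl
  | cons a t ih => simp [List.foldl_cons, ih, Function.iterate_succ_apply]

theorem sum_map_filter_eq_ite (p : Nat → Bool) (f : Nat → Int) (l : List Nat) :
    ((l.filter p).map f).sum = (l.map (fun x => if p x then f x else 0)).sum := by
  induction l with
  | nil => rfl
  | cons a t ih => by_cases h : p a <;> simp [h, ih]

theorem sum_flatMap_int (l : List Nat) (g : Nat → List Int) :
    (l.flatMap g).sum = (l.map (fun j => (g j).sum)).sum := by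
  induction l with
  | nil => rfl
  | cons a t ih => simp [List.flatMap_cons, ih]

-- cnd only depends on the operands' residues
theorem cnd_congr (p x x' y y' : Int) (hp : 0 < p) (hx : x ≡ x' [ZMOD p]) (hy : y ≡ y' [ZMOD p]) :
    cnd p x y = cnd p x' y' := by
  unfold cnd
  have h1 : (x + y) % p = (x' + y') % p := Int.ModEq.add hx hy
  have h2 : (x - y) % p = (x' - y') % p := Int.ModEq.sub hx hy
  have h3 : (-x + y) % p = (-x' + y') % p := Int.ModEq.add hx.neg hy
  have h4 : (-x - y) % p = (-x' - y') % p := Int.ModEq.sub hx.neg hy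
  simp only [PySem.Int.mod_eq_emod_of_pos hp, h1, h2, h3, h4]

-- pow2ListB entries are congruent to the true powers of two
theorem pow2ListB_getD (p : Int) (hp : 0 < p) (n : Nat) (v : Int) (j : Nat) (hj : j < n) :
    (pow2ListB p n v).getD j 0 ≡ v * 2 ^ j [ZMOD p] := by
  induction n generalizing v j with
  | zero => omega
  | succ n ih =>
    cases j with
    | zero =>
      have : v * 2 ^ 0 = v := by ring
      rw [this]; simp [pow2ListB]
    | succ j =>
      simp only [pow2ListB, List.getD_cons_succ]
      calc (pow2ListB p n (PySem.Int.mod (v * 2) p)).getD j 0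
          ≡ PySem.Int.mod (v * 2) p * 2 ^ j [ZMOD p] := ih (PySem.Int.mod (v * 2) p) j (by omega)
        _ ≡ v * 2 * 2 ^ j [ZMOD p] := Int.ModEq.mul_right _ (by
              rw [PySem.Int.mod_eq_emod_of_pos hp]
              exact (Int.emod_emod_of_dvd (v * 2) dvd_rfl : _ % p % p = _))
        _ = v * 2 ^ (j + 1) := by ring

-- the matrix A builds, in closed form
theorem createMatrixA_eq (num1 : List Int) :
    createMatrixA num1 = (List.range num1.length).map (fun i => (List.range num1.length).map
      (fun j => if cnd (2 * (num1.length : Int) + 1) ((2:Int) ^ i) ((2:Int) ^ j) then (1:Int) else 0)) := by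
  unfold createMatrixA cnd
  simp only [PySem.List.foldl_append_singleton_eq_map, List.nil_append]

theorem core_sum (m : Nat) (A B : Nat → Int) (C : Nat → Nat → Bool) :
    PySem.Int.mod (((List.range m).map (fun i =>
        PySem.Int.mod (((List.range m).map (fun j => A j * (if C j i then (1:Int) else 0))).sum) 2 * B i)).sum) 2
    = PySem.Int.mod (((List.range m).map (fun j => ((List.range m).map (fun i =>
        if C j i then A j * B i else 0)).sum)).sum) 2 := by
  have h2 : (0:Int) < 2 := by norm_num
  have hsum : ∀ n (f : Nat → Int), ((List.range n).map f).sum = ∑ i ∈ Finset.range n, f i := fun _ _ => rfl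
  simp only [PySem.Int.mod_eq_emod_of_pos h2, hsum]
  have step1 : (∑ i ∈ Finset.range m, (∑ j ∈ Finset.range m, A j * (if C j i then (1:Int) else 0)) % 2 * B i)
      ≡ (∑ i ∈ Finset.range m, (∑ j ∈ Finset.range m, A j * (if C j i then (1:Int) else 0)) * B i) [ZMOD 2] := by
    refine Int.ModEq.sum fun i _ => Int.ModEq.mul_right _ ?_
    exact (Int.emod_emod_of_dvd _ dvd_rfl : _ % (2:Int) % 2 = _ % 2)
  rw [step1]
  congr 1
  rw [Finset.sum_comm]
  · refine Finset.sum_congr rfl fun j _ => ?_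
    rw [Finset.sum_mul]
    refine Finset.sum_congr rfl fun i _ => ?_
    split_ifs <;> ring

theorem stepA_iter (num1 num2 : List Int) (h0 : 0 < num1.length)
    (hle : num1.length ≤ num2.length) (n : Nat) :
    (mulBigStepA (createMatrixA num1))^[n] (num1, num2, ([] : List Int)) =
      (rotA^[n] num1, rotA^[n] num2, (List.range n).map (dVal num1 num2)) := by
  induction n with
  | zero => rfl
  | succ n ih =>
    rw [Function.iterate_succ_apply', ih]
    have ha : (rotA^[n] num1).length = num1.length := rotA_iter_length num1 h0 n
    have hb : (rotA^[n] num2).length = num2.length := rotA_iter_length num2 (by omega) n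
    set m := num1.length with hm
    set a := rotA^[n] num1 with hA
    set b := rotA^[n] num2 with hB
    set p : Int := 2 * (m : Int) + 1 with hp
    unfold mulBigStepA
    simp only []
    refine Prod.ext ?_ (Prod.ext ?_ ?_)
    · show rotA a = rotA^[n+1] num1
      rw [Function.iterate_succ_apply']
    · show rotA b = rotA^[n+1] num2
      rw [Function.iterate_succ_apply']
    · show (List.range n).map (dVal num1 num2) ++ [_] = _
      rw [List.range_succ, List.map_append, List.map_singleton]
      congr 1
      -- the value appended at step n is dVal num1 num2 n
      have hcloseC : (List.range a.length).foldl (fun (c : List Int) (i : Nat) =>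
          c ++ [PySem.Int.mod ((List.range a.length).foldl (fun (summ : Int) (j : Nat) =>
            summ + PySem.List.pyGetD a (↑j : Int) 0 *
              PySem.List.pyGetD (PySem.List.pyGetD (createMatrixA num1) (↑j : Int) []) (↑i : Int) 0) 0) 2]) []
          = (List.range m).map (fun i => PySem.Int.mod (((List.range m).map (fun j =>
              num1.getD ((j + n) % m) 0 *
                (if cnd p ((2:Int) ^ j) ((2:Int) ^ i) then (1:Int) else 0))).sum) 2) := by
        rw [PySem.List.foldl_append_singleton_eq_map, List.nil_append, ha]
        refine List.map_congr_left fun i hi => ?_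
        rw [List.mem_range] at hi
        congr 1
        rw [PySem.List.foldl_add, zero_add]
        refine congrArg List.sum (List.map_congr_left fun j hj => ?_)
        rw [List.mem_range] at hj
        rw [PySem.List.pyGetD_natCast, PySem.List.pyGetD_natCast, PySem.List.pyGetD_natCast,
            createMatrixA_eq, PySem.List.getD_map_range _ _ _ _ hj,
            PySem.List.getD_map_range _ _ _ _ hi,
            hA, rotA_iter_getD num1 h0 n j (by omega)]
      rw [hcloseC]
      have hlen : ((List.range m).map (fun i => PySem.Int.mod (((List.range m).map (fun j =>
          num1.getD ((j + n) % m) 0 *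
            (if cnd p ((2:Int) ^ j) ((2:Int) ^ i) then (1:Int) else 0))).sum) 2)).length = m := by
        simp
      rw [hlen, PySem.List.foldl_add, zero_add]
      have hargs : (List.range m).map (fun (i : Nat) =>
          PySem.List.pyGetD ((List.range m).map (fun i => PySem.Int.mod (((List.range m).map (fun j =>
            num1.getD ((j + n) % m) 0 *
              (if cnd p ((2:Int) ^ j) ((2:Int) ^ i) then (1:Int) else 0))).sum) 2)) (↑i : Int) 0 *
          PySem.List.pyGetD b (↑i : Int) 0)
          = (List.range m).map (fun i =>
            PySem.Int.mod (((List.range m).map (fun j =>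
              num1.getD ((j + n) % m) 0 *
                (if cnd p ((2:Int) ^ j) ((2:Int) ^ i) then (1:Int) else 0))).sum) 2 *
            num2.getD ((i + n) % num2.length) 0) := by
        refine List.map_congr_left fun i hi => ?_
        rw [List.mem_range] at hi
        rw [PySem.List.pyGetD_natCast, PySem.List.pyGetD_natCast,
            PySem.List.getD_map_range _ _ _ _ hi,
            hB, rotA_iter_getD num2 (by omega) n i (by omega)]
      rw [hargs]
      rw [core_sum m (fun j => num1.getD ((j + n) % m) 0)
            (fun i => num2.getD ((i + n) % num2.length) 0)
            (fun j i => cnd p ((2:Int) ^ j) ((2:Int) ^ i))]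
      rfl

theorem mulBig_eq_map_dVal (num1 num2 : List Int) (h0 : 0 < num1.length)
    (hle : num1.length ≤ num2.length) :
    mulBig num1 num2 = (List.range num1.length).map (dVal num1 num2) := by
  show (((List.range num1.length).foldl (fun st _k => mulBigStepA (createMatrixA num1) st)
      (num1, num2, [])).2.2 : List Int) = _
  rw [foldl_ignore_iterate (mulBigStepA (createMatrixA num1)) (List.range num1.length)
        (num1, num2, []), List.length_range,
      stepA_iter num1 num2 h0 hle num1.length]

theorem mulBig_alt_eq_map_dVal (num1 num2 : List Int) (h0 : 0 < num1.length) :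
    mulBig_alt num1 num2 = (List.range num1.length).map (dVal num1 num2) := by
  have hp : (0:Int) < 2 * (num1.length : Int) + 1 := by positivity
  unfold mulBig_alt
  rw [if_neg (by omega)]
  refine List.map_congr_left fun k _ => ?_
  unfold dVal
  congr 1
  rw [List.map_flatMap, sum_flatMap_int]
  refine congrArg List.sum (List.map_congr_left fun j hj => ?_)
  rw [List.map_map, sum_map_filter_eq_ite]
  refine congrArg List.sum (List.map_congr_left fun i hi => ?_)
  simp only [List.mem_range] at hj hi
  have hcnd : ∀ a b : Nat, a < num1.length → b < num1.length →
      cnd (2 * (num1.length : Int) + 1) ((pow2ListB (2 * (num1.length : Int) + 1) num1.length 1).getD a 0)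
        ((pow2ListB (2 * (num1.length : Int) + 1) num1.length 1).getD b 0)
      = cnd (2 * (num1.length : Int) + 1) ((2:Int) ^ a) ((2:Int) ^ b) := by
    intro a b ha hb
    refine cnd_congr _ _ _ _ _ hp ?_ ?_
    · simpa using pow2ListB_getD _ hp _ 1 a ha
    · simpa using pow2ListB_getD _ hp _ 1 b hb
  have hc := hcnd j i hj hi
  simp only [PySem.List.pyGetD_natCast, List.getD] at *
  unfold cnd at hc ⊢
  rw [hc]
  rfl

-- ===== VERDICT (by name: the statement is the Claim_ definition above) =====
theorem mulBig_spec : Claim_equal_mulBig := by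
  intro num1 num2 _ hpre
  unfold Spec_mulBig
  rcases Nat.eq_zero_or_pos num1.length with h0 | h0
  · rw [List.length_eq_zero_iff] at h0
    subst h0; rfl
  · have hle : num1.length ≤ num2.length := by
      rcases hpre with h | h
      · simp [h] at h0
      · exact h
    rw [mulBig_eq_map_dVal num1 num2 h0 hle, mulBig_alt_eq_map_dVal num1 num2 h0]
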